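-- pv_equiv track=rewrite | github.com/ori346/elastic-3am-killer | phase-2/app/agents/remediation/pod_tools.py | _extract_container_info
-- ===== SOURCE A (Python) =====
-- def _extract_container_info(section_lines: list[str]) -> list[dict]:
--     """Extract container information from Containers section of oc describe output."""
--     containers = []
--     i = 0
--
--     while i < len(section_lines):
--         line = section_lines[i]
--
--         # Container name line starts with 2 spaces and ends with : (e.g., "  frontend-web:")
--         if (
--             line.startswith("  ")
--             and not line.startswith("    ")
--             and line.strip().endswith(":")
--         ):
--             container_name = line.strip().rstrip(":")
--             port = "none"
--             ready = "Unknown"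
--             limits_cpu = "none"
--             limits_mem = "none"
--
--             # Look ahead for properties (indented with 4 spaces)
--             j = i + 1
--             while j < len(section_lines):
--                 prop_line = section_lines[j]
--
--                 # Stop at next container (2-space indent with :)
--                 if prop_line.startswith("  ") and not prop_line.startswith("    "):
--                     break
--
--                 # Extract port (4-space indent, not Host Port)
--                 if (
--                     prop_line.startswith("    ")
--                     and "Port:" in prop_line
--                     and "Host Port:" not in prop_line
--                 ):
--                     port = prop_line.split("Port:")[-1].strip().split("/")[0]
--
--                 # Extract ready status
--                 elif prop_line.startswith("    ") and "Ready:" in prop_line: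
--                     ready = prop_line.split("Ready:")[-1].strip()
--
--                 # Extract limits
--                 elif prop_line.startswith("    ") and prop_line.strip() == "Limits:":
--                     # Next lines have cpu/memory (6-space indent)
--                     k = j + 1
--                     while k < len(section_lines) and section_lines[k].startswith(
--                         "      "
--                     ):
--                         if "cpu:" in section_lines[k]:
--                             limits_cpu = section_lines[k].split("cpu:")[-1].strip()
--                         if "memory:" in section_lines[k]:
--                             limits_mem = section_lines[k].split("memory:")[-1].strip()
--                         k += 1
--
--                 j += 1
--
--             containers.append(
--                 {
--                     "name": container_name,
--                     "port": port,
--                     "ready": ready,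
--                     "limits_cpu": limits_cpu,
--                     "limits_mem": limits_mem,
--                 }
--             )
--
--         i += 1
--
--     return containers
-- ===== SOURCE B (Python) =====
-- def _extract_container_info(section_lines: list[str]) -> list[dict]:
--     """Single forward pass with carried state instead of nested look-ahead loops."""
--     containers = []
--     current = None
--     in_limits = False
--     for line in section_lines:
--         if line.startswith("  ") and not line.startswith("    "):
--             if current is not None:
--                 containers.append(current)
--                 current = None
--             in_limits = False
--             stripped = line.strip()
--             if stripped.endswith(":"):
--                 current = {
--                     "name": stripped.rstrip(":"),
--                     "port": "none",
--                     "ready": "Unknown",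
--                     "limits_cpu": "none",
--                     "limits_mem": "none",
--                 }
--             continue
--         if current is None:
--             continue
--         if in_limits and line.startswith("      "):
--             if "cpu:" in line:
--                 current["limits_cpu"] = line.split("cpu:")[-1].strip()
--             if "memory:" in line:
--                 current["limits_mem"] = line.split("memory:")[-1].strip()
--         else:
--             in_limits = False
--         if line.startswith("    ") and "Port:" in line and "Host Port:" not in line:
--             current["port"] = line.split("Port:")[-1].strip().split("/")[0]
--         elif line.startswith("    ") and "Ready:" in line:
--             current["ready"] = line.split("Ready:")[-1].strip()
--         elif line.startswith("    ") and line.strip() == "Limits:":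
--             in_limits = True
--     if current is not None:
--         containers.append(current)
--     return containers
-- ===== Notes on version B (the rewrite author's own statement) =====
-- stated objective: simpler
-- what changed: Replaced A's nested look-ahead loops (an inner j-scan per container header and an inner k-scan per Limits: line, re-reading lines by index) with a single forward pass over the lines carrying the container under construction and an in-Limits flag.
import Mathlib
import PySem

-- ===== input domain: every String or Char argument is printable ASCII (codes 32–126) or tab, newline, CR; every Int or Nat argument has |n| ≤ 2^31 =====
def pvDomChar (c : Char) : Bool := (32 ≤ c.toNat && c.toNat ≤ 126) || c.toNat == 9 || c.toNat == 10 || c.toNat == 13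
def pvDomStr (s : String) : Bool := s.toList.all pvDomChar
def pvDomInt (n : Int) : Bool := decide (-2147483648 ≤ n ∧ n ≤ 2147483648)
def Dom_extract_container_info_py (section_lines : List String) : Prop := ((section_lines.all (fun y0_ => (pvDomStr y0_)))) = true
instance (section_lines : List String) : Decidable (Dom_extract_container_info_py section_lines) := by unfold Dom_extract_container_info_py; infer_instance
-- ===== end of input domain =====

-- B replaces A's nested look-ahead index loops by one forward pass carrying the
-- container under construction and an "inside Limits block" flag (objective: simpler).

-- ===== PORT A =====
-- shared string helpers (exact ports of the Python string expressions; used by both ports)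
-- s.rstrip(":") — hand port (PySem has no right-strip-with-chars): drop trailing ':' chars; exact
def pvRstripColon (s : String) : String := String.ofList ((s.toList.reverse.dropWhile (· == ':')).reverse)
-- line.startswith("  ") and not line.startswith("    ")
def pvBrk (l : String) : Bool := PySem.Str.startswith l "  " && !PySem.Str.startswith l "    "
-- line.strip().endswith(":")
def pvEndsColon (l : String) : Bool := PySem.Str.endswith (PySem.Str.strip l) ":"
def pvIsHdr (l : String) : Bool := pvBrk l && pvEndsColon l
-- line.strip().rstrip(":")
def pvName (l : String) : String := pvRstripColon (PySem.Str.strip l)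
def pvPortCond (l : String) : Bool :=
  PySem.Str.startswith l "    " && PySem.Str.isIn "Port:" l && !PySem.Str.isIn "Host Port:" l
-- line.split("Port:")[-1].strip().split("/")[0]
def pvPortVal (l : String) : String :=
  (((PySem.Str.split? (PySem.Str.strip (((PySem.Str.split? l "Port:").getD []).getLastD "")) "/").getD []).headD "")
def pvReadyCond (l : String) : Bool := PySem.Str.startswith l "    " && PySem.Str.isIn "Ready:" l
def pvReadyVal (l : String) : String := PySem.Str.strip (((PySem.Str.split? l "Ready:").getD []).getLastD "")
def pvLimCond (l : String) : Bool := PySem.Str.startswith l "    " && (PySem.Str.strip l == "Limits:")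
def pvSix (l : String) : Bool := PySem.Str.startswith l "      "
-- one k-loop body step: capture cpu / memory from a 6-space line
def pvCap (l : String) (cm : String × String) : String × String :=
  (if PySem.Str.isIn "cpu:" l then PySem.Str.strip (((PySem.Str.split? l "cpu:").getD []).getLastD "") else cm.1,
   if PySem.Str.isIn "memory:" l then PySem.Str.strip (((PySem.Str.split? l "memory:").getD []).getLastD "") else cm.2)
-- the appended dict literal (insertion order of A's dict literal = of B's updates)
def pvMkC (n : String) (q : String × String × String × String) : List (String × String) :=
  [("name", n), ("port", q.1), ("ready", q.2.1), ("limits_cpu", q.2.2.1), ("limits_mem", q.2.2.2)]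

-- inner 'while k' loop of A
def pyA_k (lines : List String) (k : Nat) (cm : String × String) : String × String :=
  if h : k < lines.length then
    if pvSix lines[k] then pyA_k lines (k + 1) (pvCap lines[k] cm) else cm
  else cm
termination_by lines.length - k

-- 'while j' look-ahead loop of A; returns (port, ready, limits_cpu, limits_mem)
def pyA_j (lines : List String) (j : Nat) (p r : String) (cm : String × String) :
    String × String × String × String :=
  if h : j < lines.length then
    let l := lines[j]
    if pvBrk l then (p, r, cm.1, cm.2)
    else if pvPortCond l then pyA_j lines (j + 1) (pvPortVal l) r cm
    else if pvReadyCond l then pyA_j lines (j + 1) p (pvReadyVal l) cm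
    else if pvLimCond l then pyA_j lines (j + 1) p r (pyA_k lines (j + 1) cm)
    else pyA_j lines (j + 1) p r cm
  else (p, r, cm.1, cm.2)
termination_by lines.length - j

-- outer 'while i' loop of A
def pyA_i (lines : List String) (i : Nat) (acc : List (List (String × String))) :
    List (List (String × String)) :=
  if h : i < lines.length then
    let l := lines[i]
    if pvIsHdr l then
      pyA_i lines (i + 1) (acc ++ [pvMkC (pvName l) (pyA_j lines (i + 1) "none" "Unknown" ("none", "none"))])
    else pyA_i lines (i + 1) acc
  else acc
termination_by lines.length - i

def extract_container_info_py (section_lines : List String) : List (List (String × String)) :=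
  pyA_i section_lines 0 []

-- ===== PORT B =====
-- state: (containers so far, container under construction, inside-Limits flag)
def pyB_State : Type := List (List (String × String)) × Option (String × String × String × String × String) × Bool

def pyB_flush (acc : List (List (String × String)))
    (cur : Option (String × String × String × String × String)) : List (List (String × String)) :=
  match cur with
  | some (n, p, r, c, m) => acc ++ [pvMkC n (p, r, c, m)]
  | none => acc

def pyB_step (st : pyB_State) (l : String) : pyB_State :=
  let (acc, cur, inl) := st
  if pvBrk l then
    (pyB_flush acc cur,
     if pvEndsColon l then some (pvName l, "none", "Unknown", "none", "none") else none,
     false)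
  else
    match cur with
    | none => (acc, none, inl)
    | some (n, p, r, c, m) =>
      let cm := if inl && pvSix l then pvCap l (c, m) else (c, m)
      let inl' := inl && pvSix l
      if pvPortCond l then (acc, some (n, pvPortVal l, r, cm.1, cm.2), inl')
      else if pvReadyCond l then (acc, some (n, p, pvReadyVal l, cm.1, cm.2), inl')
      else if pvLimCond l then (acc, some (n, p, r, cm.1, cm.2), true)
      else (acc, some (n, p, r, cm.1, cm.2), inl')

def extract_container_info_py_alt (section_lines : List String) : List (List (String × String)) :=
  let st := section_lines.foldl pyB_step ([], none, false)
  pyB_flush st.1 st.2.1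

-- ===== PRECONDITION & SPEC =====
def Spec_extract_container_info_py (section_lines : List String) (out : List (List (String × String))) : Prop := out = extract_container_info_py_alt section_lines
instance (section_lines : List String) (out : List (List (String × String))) : Decidable (Spec_extract_container_info_py section_lines out) := by unfold Spec_extract_container_info_py; infer_instance

-- ===== CLAIM (what is proved, stated in full; the proofs are below) =====
def Claim_equal_extract_container_info_py : Prop := ∀ (section_lines : List String), Dom_extract_container_info_py section_lines → Spec_extract_container_info_py section_lines (extract_container_info_py section_lines)

-- ===== LEMMAS AND PROOFS =====

-- structural (suffix) versions of A's three loops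
def kS : List String → String × String → String × String
  | [], cm => cm
  | l :: rest, cm => if pvSix l then kS rest (pvCap l cm) else cm

def jS : List String → String → String → String × String → String × String × String × String
  | [], p, r, cm => (p, r, cm.1, cm.2)
  | l :: rest, p, r, cm =>
    if pvBrk l then (p, r, cm.1, cm.2)
    else if pvPortCond l then jS rest (pvPortVal l) r cm
    else if pvReadyCond l then jS rest p (pvReadyVal l) cm
    else if pvLimCond l then jS rest p r (kS rest cm)
    else jS rest p r cm

def iS : List String → List (List (String × String)) → List (List (String × String))
  | [], acc => acc
  | l :: rest, acc =>
    if pvIsHdr l then iS rest (acc ++ [pvMkC (pvName l) (jS rest "none" "Unknown" ("none", "none"))])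
    else iS rest acc

-- B's property processing, with the carried in-Limits flag, as a function of the suffix
def jF : List String → String → String → String × String → Bool → String × String × String × String
  | [], p, r, cm, _ => (p, r, cm.1, cm.2)
  | l :: rest, p, r, cm, inl =>
    if pvBrk l then (p, r, cm.1, cm.2)
    else
      let cm' := if inl && pvSix l then pvCap l cm else cm
      let inl' := inl && pvSix l
      if pvPortCond l then jF rest (pvPortVal l) r cm' inl'
      else if pvReadyCond l then jF rest p (pvReadyVal l) cm' inl'
      else if pvLimCond l then jF rest p r cm' true
      else jF rest p r cm' inl'

-- componentwise view of kS
def kC : List String → String → String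
  | [], c => c
  | l :: rest, c =>
    if pvSix l then
      kC rest (if PySem.Str.isIn "cpu:" l then PySem.Str.strip (((PySem.Str.split? l "cpu:").getD []).getLastD "") else c)
    else c

def kM : List String → String → String
  | [], m => m
  | l :: rest, m =>
    if pvSix l then
      kM rest (if PySem.Str.isIn "memory:" l then PySem.Str.strip (((PySem.Str.split? l "memory:").getD []).getLastD "") else m)
    else m

theorem kS_eq_pair : ∀ (l : List String) (cm : String × String), kS l cm = (kC l cm.1, kM l cm.2) := by
  intro l
  induction l with
  | nil => intro cm; rfl
  | cons x rest ih =>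
    intro cm
    by_cases hx : pvSix x = true
    · simp [kS, kC, kM, hx, pvCap, ih]
    · simp [kS, kC, kM, hx]

theorem kC_or (l : List String) : ∀ c c' : String, kC l c = kC l c' ∨ (kC l c = c ∧ kC l c' = c') := by
  induction l with
  | nil => intro c c'; right; exact ⟨rfl, rfl⟩
  | cons x rest ih =>
    intro c c'
    simp only [kC]
    split_ifs with hx hc
    · left; rfl
    · exact ih c c'
    · right; exact ⟨rfl, rfl⟩

theorem kM_or (l : List String) : ∀ m m' : String, kM l m = kM l m' ∨ (kM l m = m ∧ kM l m' = m') := by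
  induction l with
  | nil => intro m m'; right; exact ⟨rfl, rfl⟩
  | cons x rest ih =>
    intro m m'
    simp only [kM]
    split_ifs with hx hc
    · left; rfl
    · exact ih m m'
    · right; exact ⟨rfl, rfl⟩

theorem kS_idem (l : List String) (cm : String × String) : kS l (kS l cm) = kS l cm := by
  rw [kS_eq_pair, kS_eq_pair]
  have hc : kC l (kC l cm.1) = kC l cm.1 := by
    rcases kC_or l (kC l cm.1) cm.1 with h | h
    · exact h
    · exact h.1
  have hm : kM l (kM l cm.2) = kM l cm.2 := by
    rcases kM_or l (kM l cm.2) cm.2 with h | h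
    · exact h
    · exact h.1
  simp [hc, hm]

-- a 6-space line is never a break line
theorem six_not_brk (l : String) (h : pvSix l = true) : pvBrk l = false := by
  have h6 : ("      ".toList) <+: l.toList := by
    simpa [pvSix, PySem.Str.startswith_eq, PySem.Chars.startswith,
      List.isPrefixOf_iff_prefix] using h
  have h4 : PySem.Chars.startswith l.toList "    ".toList = true := by
    simp only [PySem.Chars.startswith, List.isPrefixOf_iff_prefix]
    exact (by decide : ("    ".toList) <+: ("      ".toList)).trans h6
  simpa [pvBrk, PySem.Str.startswith_eq] using fun _ => h4

-- the core look-ahead ↔ carried-flag correspondence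
theorem jS_eq_jF (l : List String) : ∀ (p r : String) (cm : String × String),
    jS l p r cm = jF l p r cm false ∧ jS l p r (kS l cm) = jF l p r cm true := by
  induction l with
  | nil => intro p r cm; exact ⟨rfl, rfl⟩
  | cons x rest ih =>
    intro p r cm
    by_cases hb : pvBrk x = true
    · have hx : pvSix x = false := by
        by_cases h6 : pvSix x = true
        · rw [six_not_brk x h6] at hb; exact absurd hb (by simp)
        · simpa using h6
      constructor
      · simp [jS, jF, hb]
      · simp [jS, jF, kS, hb, hx]
    · have hbf : pvBrk x = false := by simpa using hb
      by_cases hx : pvSix x = true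
      · -- 6-space line: kS consumes it; jF captures it
        constructor
        · -- false flag: no capture
          simp only [jS, jF, hbf, Bool.false_and, Bool.false_eq_true, if_false]
          by_cases hp : pvPortCond x = true
          · simpa [hp] using (ih (pvPortVal x) r cm).1
          · by_cases hr : pvReadyCond x = true
            · simpa [hp, hr] using (ih p (pvReadyVal x) cm).1
            · by_cases hl : pvLimCond x = true
              · simpa [hp, hr, hl] using (ih p r cm).2
              · simpa [hp, hr, hl] using (ih p r cm).1
        · -- true flag: capture head, stay in limits
          have hk : kS (x :: rest) cm = kS rest (pvCap x cm) := by simp [kS, hx]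
          rw [hk]
          simp only [jS, jF, hbf, hx, Bool.true_and, Bool.false_eq_true, if_false, if_true]
          by_cases hp : pvPortCond x = true
          · simpa [hp, hbf] using (ih (pvPortVal x) r (pvCap x cm)).2
          · by_cases hr : pvReadyCond x = true
            · simpa [hp, hr, hbf] using (ih p (pvReadyVal x) (pvCap x cm)).2
            · by_cases hl : pvLimCond x = true
              · simpa [hp, hr, hl, kS_idem] using (ih p r (pvCap x cm)).2
              · simpa [hp, hr, hl, hbf] using (ih p r (pvCap x cm)).2
      · have hxf : pvSix x = false := by simpa using hx
        have hk : kS (x :: rest) cm = cm := by simp [kS, hxf]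
        rw [hk]
        have main : jS (x :: rest) p r cm = jF (x :: rest) p r cm false ∧
            jS (x :: rest) p r cm = jF (x :: rest) p r cm true := by
          constructor <;>
          · simp only [jS, jF, hbf, hxf, Bool.and_false, Bool.false_eq_true, if_false]
            by_cases hp : pvPortCond x = true
            · simpa [hp] using (ih (pvPortVal x) r cm).1
            · by_cases hr : pvReadyCond x = true
              · simpa [hp, hr] using (ih p (pvReadyVal x) cm).1
              · by_cases hl : pvLimCond x = true
                · simpa [hp, hr, hl] using (ih p r cm).2
                · simpa [hp, hr, hl] using (ih p r cm).1
        exact ⟨main.1, main.2⟩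

-- A's index loops compute the structural versions on the suffix
theorem pyA_k_eq (lines : List String) (k : Nat) (cm : String × String) :
    pyA_k lines k cm = kS (lines.drop k) cm := by
  by_cases h : k < lines.length
  · rw [pyA_k, dif_pos h, List.drop_eq_getElem_cons h]
    by_cases hs : pvSix lines[k] = true
    · simp only [hs, kS, if_pos rfl]
      exact pyA_k_eq lines (k + 1) (pvCap lines[k] cm)
    · simp [kS, hs]
  · rw [pyA_k, dif_neg h, List.drop_eq_nil_of_le (by omega), kS]
termination_by lines.length - k

theorem pyA_j_eq (lines : List String) (j : Nat) (p r : String) (cm : String × String) :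
    pyA_j lines j p r cm = jS (lines.drop j) p r cm := by
  by_cases h : j < lines.length
  · rw [pyA_j, dif_pos h, List.drop_eq_getElem_cons h]
    simp only [jS]
    by_cases hb : pvBrk lines[j] = true
    · simp [hb]
    · have hd : lines.drop (j + 1) = List.drop (j + 1) lines := rfl
      by_cases hp : pvPortCond lines[j] = true
      · simp only [hb, hp, if_true]
        exact pyA_j_eq lines (j + 1) (pvPortVal lines[j]) r cm
      · by_cases hr : pvReadyCond lines[j] = true
        · simp only [hb, hp, hr, if_true]
          exact pyA_j_eq lines (j + 1) p (pvReadyVal lines[j]) cm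
        · by_cases hl : pvLimCond lines[j] = true
          · simp only [hb, hp, hr, hl, if_true]
            rw [pyA_k_eq lines (j + 1) cm]
            exact pyA_j_eq lines (j + 1) p r (kS (lines.drop (j + 1)) cm)
          · simp only [hb, hp, hr, hl, if_false]
            exact pyA_j_eq lines (j + 1) p r cm
  · rw [pyA_j, dif_neg h, List.drop_eq_nil_of_le (by omega), jS]
termination_by lines.length - j

theorem pyA_i_eq (lines : List String) (i : Nat) (acc : List (List (String × String))) :
    pyA_i lines i acc = iS (lines.drop i) acc := by
  by_cases h : i < lines.length
  · rw [pyA_i, dif_pos h, List.drop_eq_getElem_cons h]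
    simp only [iS]
    by_cases hx : pvIsHdr lines[i] = true
    · simp only [hx, if_true]
      rw [pyA_j_eq lines (i + 1) "none" "Unknown" ("none", "none")]
      exact pyA_i_eq lines (i + 1) _
    · simp only [hx, if_false]
      exact pyA_i_eq lines (i + 1) acc
  · rw [pyA_i, dif_neg h, List.drop_eq_nil_of_le (by omega), iS]
termination_by lines.length - i

-- B's fold computes iS
theorem foldB_eq (l : List String) : ∀ (acc : List (List (String × String))) (inl : Bool),
    (∀ b : Bool, pyB_flush (l.foldl pyB_step (acc, none, b)).1 (l.foldl pyB_step (acc, none, b)).2.1 = iS l acc) ∧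
    (∀ (n p r c m : String),
      pyB_flush (l.foldl pyB_step (acc, some (n, p, r, c, m), inl)).1
          (l.foldl pyB_step (acc, some (n, p, r, c, m), inl)).2.1 =
        iS l (acc ++ [pvMkC n (jF l p r (c, m) inl)])) := by
  induction l with
  | nil =>
    intro acc inl
    constructor
    · intro b; simp [pyB_flush, iS]
    · intro n p r c m; simp [pyB_flush, iS, jF, pvMkC]
  | cons x rest ih =>
    intro acc inl
    have hflushn : ∀ a, pyB_flush a none = a := fun _ => rfl
    have hflushs : ∀ a n p r c m, pyB_flush a (some (n, p, r, c, m)) = a ++ [pvMkC n (p, r, c, m)] :=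
      fun _ _ _ _ _ _ => rfl
    by_cases hb : pvBrk x = true
    · have hdr_or : pvIsHdr x = pvEndsColon x := by simp [pvIsHdr, hb]
      have hstep : ∀ cur b, pyB_step (acc, cur, b) x =
          (pyB_flush acc cur,
           if pvEndsColon x then some (pvName x, "none", "Unknown", "none", "none") else none,
           false) := by
        intro cur b; simp [pyB_step, hb]
      constructor
      · intro b
        rw [List.foldl_cons, hstep, hflushn]
        by_cases he : pvEndsColon x = true
        · rw [if_pos he]
          rw [(ih acc false).2 (pvName x) "none" "Unknown" "none" "none"]
          simp only [iS, hdr_or, he, if_true]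
          rw [(jS_eq_jF rest "none" "Unknown" ("none", "none")).1]
        · have hef : pvEndsColon x = false := by simpa using he
          rw [if_neg (by simp [hef])]
          rw [((ih acc false).1) false]
          simp only [iS, hdr_or, hef, Bool.false_eq_true, if_false]
      · intro n p r c m
        rw [List.foldl_cons, hstep, hflushs]
        have hjf : jF (x :: rest) p r (c, m) inl = (p, r, c, m) := by simp [jF, hb]
        rw [hjf]
        by_cases he : pvEndsColon x = true
        · rw [if_pos he]
          rw [(ih (acc ++ [pvMkC n (p, r, c, m)]) false).2 (pvName x) "none" "Unknown" "none" "none"]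
          simp only [iS, hdr_or, he, if_true]
          rw [(jS_eq_jF rest "none" "Unknown" ("none", "none")).1]
        · have hef : pvEndsColon x = false := by simpa using he
          rw [if_neg (by simp [hef])]
          rw [((ih (acc ++ [pvMkC n (p, r, c, m)]) false).1) false]
          simp only [iS, hdr_or, hef, Bool.false_eq_true, if_false]
    · have hbf : pvBrk x = false := by simpa using hb
      have hhdr : pvIsHdr x = false := by simp [pvIsHdr, hbf]
      constructor
      · intro b
        have hstep : pyB_step (acc, none, b) x = (acc, none, b) := by
          simp [pyB_step, hbf]
        rw [List.foldl_cons, hstep, ((ih acc inl).1) b]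
        simp [iS, hhdr]
      · intro n p r c m
        rw [List.foldl_cons]
        have hjf : jF (x :: rest) p r (c, m) inl =
            (if pvPortCond x then jF rest (pvPortVal x) r (if inl && pvSix x then pvCap x (c, m) else (c, m)) (inl && pvSix x)
             else if pvReadyCond x then jF rest p (pvReadyVal x) (if inl && pvSix x then pvCap x (c, m) else (c, m)) (inl && pvSix x)
             else if pvLimCond x then jF rest p r (if inl && pvSix x then pvCap x (c, m) else (c, m)) true
             else jF rest p r (if inl && pvSix x then pvCap x (c, m) else (c, m)) (inl && pvSix x)) := by
          simp only [jF, hbf, Bool.false_eq_true, if_false]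
        rw [hjf]
        simp only [iS, hhdr, Bool.false_eq_true, if_false]
        by_cases hp : pvPortCond x = true
        · have hstep : pyB_step (acc, some (n, p, r, c, m), inl) x =
              ((acc : List (List (String × String))),
               (some (n, pvPortVal x, r,
                 (if inl && pvSix x then pvCap x (c, m) else (c, m)).1,
                 (if inl && pvSix x then pvCap x (c, m) else (c, m)).2) :
                  Option (String × String × String × String × String)),
               (inl && pvSix x : Bool)) := by
            simp only [pyB_step, hbf, Bool.false_eq_true, if_false, hp, if_true]
          rw [hstep]
          simp only [hp, if_true]
          exact (ih acc (inl && pvSix x)).2 n (pvPortVal x) r _ _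
        · have hpf : pvPortCond x = false := by simpa using hp
          simp only [hpf, Bool.false_eq_true, if_false]
          by_cases hr : pvReadyCond x = true
          · have hstep : pyB_step (acc, some (n, p, r, c, m), inl) x =
                ((acc : List (List (String × String))),
                 (some (n, p, pvReadyVal x,
                   (if inl && pvSix x then pvCap x (c, m) else (c, m)).1,
                   (if inl && pvSix x then pvCap x (c, m) else (c, m)).2) :
                    Option (String × String × String × String × String)),
                 (inl && pvSix x : Bool)) := by
              simp only [pyB_step, hbf, hpf, Bool.false_eq_true, if_false, hr, if_true]
            rw [hstep]
            simp only [hr, if_true]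
            exact (ih acc (inl && pvSix x)).2 n p (pvReadyVal x) _ _
          · have hrf : pvReadyCond x = false := by simpa using hr
            simp only [hrf, Bool.false_eq_true, if_false]
            by_cases hl : pvLimCond x = true
            · have hstep : pyB_step (acc, some (n, p, r, c, m), inl) x =
                  ((acc : List (List (String × String))),
                   (some (n, p, r,
                     (if inl && pvSix x then pvCap x (c, m) else (c, m)).1,
                     (if inl && pvSix x then pvCap x (c, m) else (c, m)).2) :
                      Option (String × String × String × String × String)),
                   (true : Bool)) := by
                simp only [pyB_step, hbf, hpf, hrf, Bool.false_eq_true, if_false, hl, if_true]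
              rw [hstep]
              simp only [hl, if_true]
              exact (ih acc true).2 n p r _ _
            · have hlf : pvLimCond x = false := by simpa using hl
              simp only [hlf, Bool.false_eq_true, if_false]
              have hstep : pyB_step (acc, some (n, p, r, c, m), inl) x =
                  ((acc : List (List (String × String))),
                   (some (n, p, r,
                     (if inl && pvSix x then pvCap x (c, m) else (c, m)).1,
                     (if inl && pvSix x then pvCap x (c, m) else (c, m)).2) :
                      Option (String × String × String × String × String)),
                   (inl && pvSix x : Bool)) := by
                simp only [pyB_step, hbf, hpf, hrf, hlf, Bool.false_eq_true, if_false]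
              rw [hstep]
              exact (ih acc (inl && pvSix x)).2 n p r _ _

-- ===== VERDICT (by name: the statement is the Claim_ definition above) =====
theorem extract_container_info_py_spec : Claim_equal_extract_container_info_py := by
  intro lines _
  show extract_container_info_py lines = extract_container_info_py_alt lines
  unfold extract_container_info_py extract_container_info_py_alt
  rw [pyA_i_eq lines 0 []]
  simp only [List.drop_zero]
  exact ((((foldB_eq lines) [] false).1) false).symm
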